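-- pv_equiv track=rewrite | github.com/Ranjithkumar3005/python_programs | leetcode/pivot_integer.py | check
-- ===== SOURCE A (Python) =====
-- def check(n,n1):
--     sum=0
--     sum1=0
--     for i in range(1,n1+1):
--         sum+=i
--
--     for i in range(n,n1-1,-1):
--         sum1+=i
--     if sum==sum1:
--         return True
-- ===== SOURCE B (Python) =====
-- def check(n, n1):
--     # closed-form arithmetic series sums instead of the two loops
--     s = n1 * (n1 + 1) // 2 if n1 >= 1 else 0
--     s1 = (n * (n + 1) - (n1 - 1) * n1) // 2 if n >= n1 else 0
--     if s == s1:
--         return True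
-- ===== Notes on version B (the rewrite author's own statement) =====
-- stated objective: faster
-- what changed: Replaces the two summation loops by closed-form arithmetic-series formulas, keeping the implicit None when the sums differ.
import Mathlib
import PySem

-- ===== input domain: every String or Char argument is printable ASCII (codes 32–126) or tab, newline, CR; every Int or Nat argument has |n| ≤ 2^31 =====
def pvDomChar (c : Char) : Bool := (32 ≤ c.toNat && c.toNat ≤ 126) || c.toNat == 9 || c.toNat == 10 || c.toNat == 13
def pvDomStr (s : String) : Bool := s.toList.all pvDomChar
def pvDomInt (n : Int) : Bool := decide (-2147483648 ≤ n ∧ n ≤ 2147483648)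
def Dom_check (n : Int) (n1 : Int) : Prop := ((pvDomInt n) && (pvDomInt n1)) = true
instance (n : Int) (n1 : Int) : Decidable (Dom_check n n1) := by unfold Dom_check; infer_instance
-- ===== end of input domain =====

-- B replaces the two summation loops by closed-form arithmetic-series formulas (O(1) instead of O(n)).

-- ===== PORT A =====
def check (n : Int) (n1 : Int) : Option Bool :=
  let sum := (PySem.List.pyRange 1 (n1 + 1) 1).foldl (fun acc i => acc + i) 0
  let sum1 := (PySem.List.pyRange n (n1 - 1) (-1)).foldl (fun acc i => acc + i) 0
  if sum = sum1 then some true else none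

-- ===== PORT B =====
def check_alt (n : Int) (n1 : Int) : Option Bool :=
  let s := if 1 ≤ n1 then PySem.Int.floordiv (n1 * (n1 + 1)) 2 else 0
  let s1 := if n1 ≤ n then PySem.Int.floordiv (n * (n + 1) - (n1 - 1) * n1) 2 else 0
  if s = s1 then some true else none

-- ===== PRECONDITION & SPEC =====
def Spec_check (n : Int) (n1 : Int) (out : Option Bool) : Prop := out = check_alt n n1
instance (n : Int) (n1 : Int) (out : Option Bool) : Decidable (Spec_check n n1 out) := by unfold Spec_check; infer_instance

-- ===== CLAIM (what is proved, stated in full; the proofs are below) =====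
def Claim_equal_check : Prop := ∀ (n : Int) (n1 : Int), Dom_check n n1 → Spec_check n n1 (check n n1)

-- ===== LEMMAS AND PROOFS =====

theorem pv_foldl_sum (l : List Int) (init : Int) :
    l.foldl (fun acc i => acc + i) init = init + l.sum := by
  induction l generalizing init with
  | nil => simp
  | cons x xs ih => simp [List.foldl, ih, add_assoc]

theorem pv_two_sum (k : Nat) (a : Int) :
    2 * (PySem.List.pyRange a (a + k) 1).sum = k * (2 * a + k - 1) := by
  induction k with
  | zero => simp [PySem.List.pyRange_one_eq_nil (le_refl a)]
  | succ k ih =>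
    have h : PySem.List.pyRange a (a + (k + 1 : Nat)) 1
        = PySem.List.pyRange a (a + k) 1 ++ [a + k] := by
      have h0 : a ≤ a + (k : Int) := by omega
      have := PySem.List.pyRange_one_succ_right h0
      push_cast
      rw [show a + ((k : Int) + 1) = a + (k : Int) + 1 by ring]
      exact this
    rw [h]
    simp only [List.sum_append, List.sum_cons, List.sum_nil]
    push_cast
    push_cast at ih
    ring_nf
    ring_nf at ih
    linarith [ih]

theorem pv_floordiv_two_mul (s : Int) : PySem.Int.floordiv (2 * s) 2 = s := by
  rw [PySem.Int.floordiv_eq_ediv_of_pos (by norm_num)]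
  omega

theorem pv_sum_closed (a b : Int) (h : a ≤ b) :
    (PySem.List.pyRange a b 1).sum = PySem.Int.floordiv ((b - a) * (a + b - 1)) 2 := by
  have hk : b = a + ((b - a).toNat : Int) := by omega
  have h2 := pv_two_sum (b - a).toNat a
  rw [← hk] at h2
  have : (b - a) * (a + b - 1) = 2 * (PySem.List.pyRange a b 1).sum := by
    rw [h2, show ((b - a).toNat : Int) = b - a by omega]; ring
  rw [this, pv_floordiv_two_mul]

-- ===== VERDICT (by name: the statement is the Claim_ definition above) =====
theorem check_spec : Claim_equal_check := by
  intro n n1 _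
  unfold Spec_check check check_alt
  simp only [pv_foldl_sum, zero_add]
  have hasc : (PySem.List.pyRange 1 (n1 + 1) 1).sum
      = (if 1 ≤ n1 then PySem.Int.floordiv (n1 * (n1 + 1)) 2 else 0) := by
    by_cases h : 1 ≤ n1
    · rw [pv_sum_closed 1 (n1 + 1) (by omega), if_pos h,
        show (n1 + 1 - 1) * (1 + (n1 + 1) - 1) = n1 * (n1 + 1) by ring]
    · rw [PySem.List.pyRange_one_eq_nil (by omega), if_neg h]; simp
  have hdesc : (PySem.List.pyRange n (n1 - 1) (-1)).sum
      = (if n1 ≤ n then PySem.Int.floordiv (n * (n + 1) - (n1 - 1) * n1) 2 else 0) := by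
    rw [PySem.List.pyRange_neg_one_eq_reverse, List.sum_reverse]
    by_cases h : n1 ≤ n
    · rw [pv_sum_closed (n1 - 1 + 1) (n + 1) (by omega), if_pos h,
        show (n + 1 - (n1 - 1 + 1)) * ((n1 - 1 + 1) + (n + 1) - 1) = n * (n + 1) - (n1 - 1) * n1 by ring]
    · rw [PySem.List.pyRange_one_eq_nil (by omega), if_neg h]; simp
  rw [hasc, hdesc]
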